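-- pv_equiv track=rewrite | github.com/Studenecivb/CarpePy | carpepy/core_functions.py | GappedQuotientSplit
-- ===== SOURCE A (Python) =====
-- def GappedQuotientSplit(lst, Q):
--     """
--     Splits the list `lst` into sublists where consecutive elements share the same quotient when divided by `Q`.
--     """
--     quotients = [x // Q for x in lst]
--
--     groups = []
--     current_group = [lst[0]]
--
--     for i in range(1, len(lst)):
--         if quotients[i] == quotients[i - 1]:
--             current_group.append(lst[i])
--         else:
--             groups.append(current_group)
--             current_group = [lst[i]]
--
--     groups.append(current_group)
--     return groups
-- ===== SOURCE B (Python) =====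
-- def GappedQuotientSplit(lst, Q):
--     """Two-pointer run scanner: find each maximal run of equal quotient and slice it out."""
--     if not lst:
--         return []
--     groups = []
--     i = 0
--     n = len(lst)
--     while i < n:
--         k = lst[i] // Q
--         j = i + 1
--         while j < n and lst[j] // Q == k:
--             j += 1
--         groups.append(lst[i:j])
--         i = j
--     return groups
-- ===== Notes on version B (the rewrite author's own statement) =====
-- stated objective: alternative
-- what changed: Replaces A's precomputed quotient table plus group/current-group accumulator loop by a two-pointer scanner that finds the end of each maximal equal-quotient run and slices it out of the list.
import Mathlib
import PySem

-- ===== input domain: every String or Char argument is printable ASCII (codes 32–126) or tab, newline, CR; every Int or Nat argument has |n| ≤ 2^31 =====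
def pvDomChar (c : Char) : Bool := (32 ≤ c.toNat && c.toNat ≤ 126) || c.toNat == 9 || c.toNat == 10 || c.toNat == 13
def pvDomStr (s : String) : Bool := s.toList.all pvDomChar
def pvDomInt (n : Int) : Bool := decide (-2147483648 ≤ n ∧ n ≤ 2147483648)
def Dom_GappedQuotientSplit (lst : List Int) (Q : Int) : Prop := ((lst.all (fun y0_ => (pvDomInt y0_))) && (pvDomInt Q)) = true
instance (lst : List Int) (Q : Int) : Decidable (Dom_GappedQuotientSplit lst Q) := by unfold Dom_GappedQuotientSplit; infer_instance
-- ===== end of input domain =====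

-- B replaces A's quotient table + accumulator loop by a two-pointer run scanner that slices
-- out each maximal equal-quotient run (objective: alternative decomposition).

-- ===== PORT A =====
def GappedQuotientSplit (lst : List Int) (Q : Int) : List (List Int) :=
  let quotients := lst.map (fun x => PySem.Int.floordiv x Q)
  let st := (PySem.List.pyRange 1 (lst.length : Int) 1).foldl
    (fun (st : List (List Int) × List Int) i =>
      if PySem.List.pyGetD quotients i 0 == PySem.List.pyGetD quotients (i - 1) 0
      then (st.1, st.2 ++ [PySem.List.pyGetD lst i 0])
      else (st.1 ++ [st.2], [PySem.List.pyGetD lst i 0]))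
    ([], [PySem.List.pyGetD lst 0 0])
  st.1 ++ [st.2]

-- ===== PORT B =====
-- inner while loop of Source B: advance j while j < n and lst[j] // Q == k
-- (fuel makes the recursion structural; lst.length - j fuel always suffices)
def pvScanRun (lst : List Int) (Q k : Int) : Nat → Nat → Nat
  | 0, j => j
  | fuel + 1, j =>
    if h : j < lst.length then
      if PySem.Int.floordiv lst[j] Q == k then pvScanRun lst Q k fuel (j + 1) else j
    else j

-- outer while loop of Source B (fuel likewise)
def pvRunLoop (lst : List Int) (Q : Int) : Nat → Nat → List (List Int) → List (List Int)
  | 0, _, groups => groups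
  | fuel + 1, i, groups =>
    if h : i < lst.length then
      let k := PySem.Int.floordiv lst[i] Q
      let j := pvScanRun lst Q k (lst.length - i) (i + 1)
      pvRunLoop lst Q fuel j (groups ++ [PySem.List.slice lst (some (i : Int)) (some (j : Int))])
    else groups

def GappedQuotientSplit_alt (lst : List Int) (Q : Int) : List (List Int) :=
  if lst = [] then [] else pvRunLoop lst Q lst.length 0 []

-- ===== PRECONDITION & SPEC =====
-- Pre_ excludes exactly the inputs on which the Python A raises: the empty list
-- (IndexError on lst[0]) and Q = 0 (ZeroDivisionError in the quotient comprehension).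
def Pre_GappedQuotientSplit (lst : List Int) (Q : Int) : Prop := lst ≠ [] ∧ Q ≠ 0
instance (lst : List Int) (Q : Int) : Decidable (Pre_GappedQuotientSplit lst Q) := by unfold Pre_GappedQuotientSplit; infer_instance
def pvWitness_GappedQuotientSplit : List Int × Int := ([3, 4, 9, 10], 3)

def Spec_GappedQuotientSplit (lst : List Int) (Q : Int) (out : List (List Int)) : Prop := out = GappedQuotientSplit_alt lst Q
instance (lst : List Int) (Q : Int) (out : List (List Int)) : Decidable (Spec_GappedQuotientSplit lst Q out) := by unfold Spec_GappedQuotientSplit; infer_instance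

-- ===== CLAIM (what is proved, stated in full; the proofs are below) =====
def Claim_equal_GappedQuotientSplit : Prop := ∀ (lst : List Int) (Q : Int), Dom_GappedQuotientSplit lst Q → Pre_GappedQuotientSplit lst Q → Spec_GappedQuotientSplit lst Q (GappedQuotientSplit lst Q)

-- ===== LEMMAS AND PROOFS =====

-- the quotient key
def pvF (Q x : Int) : Int := PySem.Int.floordiv x Q

-- reference: the list split into maximal runs of equal quotient
def pvRuns (Q : Int) : List Int → List (List Int)
  | [] => []
  | x :: xs =>
    (x :: xs.takeWhile (fun y => pvF Q y == pvF Q x)) :: pvRuns Q (xs.dropWhile (fun y => pvF Q y == pvF Q x))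
termination_by xs => xs.length
decreasing_by
  have := List.length_dropWhile_le (fun y => pvF Q y == pvF Q x) xs
  simp
  omega

-- structural form of A's loop: gs = closed groups, cur = current group, prev = previous element
def pvLoopS (Q : Int) (gs : List (List Int)) (cur : List Int) (prev : Int) : List Int → List (List Int)
  | [] => gs ++ [cur]
  | x :: xs =>
    if pvF Q x == pvF Q prev then pvLoopS Q gs (cur ++ [x]) x xs
    else pvLoopS Q (gs ++ [cur]) [x] x xs

theorem pvLoopS_eq (Q : Int) : ∀ (xs : List Int) (gs : List (List Int)) (cur : List Int) (prev : Int),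
    pvLoopS Q gs cur prev xs =
      gs ++ ((cur ++ xs.takeWhile (fun y => pvF Q y == pvF Q prev)) ::
        pvRuns Q (xs.dropWhile (fun y => pvF Q y == pvF Q prev))) := by
  intro xs
  induction xs with
  | nil => intro gs cur prev; simp [pvLoopS, pvRuns]
  | cons x t ih =>
    intro gs cur prev
    by_cases h : (pvF Q x == pvF Q prev) = true
    · have hx : pvF Q x = pvF Q prev := beq_iff_eq.mp h
      have hl : pvLoopS Q gs cur prev (x :: t) = pvLoopS Q gs (cur ++ [x]) x t := by
        simp [pvLoopS, h]
      rw [hl, ih]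
      simp only [List.takeWhile_cons, List.dropWhile_cons, h, if_pos]
      simp [hx]
    · have h' : (pvF Q x == pvF Q prev) = false := by simpa using h
      have hl : pvLoopS Q gs cur prev (x :: t) = pvLoopS Q (gs ++ [cur]) [x] x t := by
        simp [pvLoopS, h']
      rw [hl, ih]
      simp only [List.takeWhile_cons, List.dropWhile_cons, h', Bool.false_eq_true, if_false]
      simp [pvRuns]

theorem pvScanRun_eq (lst : List Int) (Q k : Int) : ∀ (m j : Nat), lst.length - j ≤ m →
    pvScanRun lst Q k m j = j + ((lst.drop j).takeWhile (fun y => PySem.Int.floordiv y Q == k)).length := by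
  intro m
  induction m with
  | zero =>
    intro j hj
    have hlen : lst.length ≤ j := by omega
    rw [pvScanRun]
    simp [List.drop_eq_nil_of_le hlen]
  | succ m ih =>
    intro j hj
    rw [pvScanRun]
    by_cases h1 : j < lst.length
    · have hdrop : lst.drop j = lst[j] :: lst.drop (j + 1) := List.drop_eq_getElem_cons h1
      by_cases h2 : (PySem.Int.floordiv lst[j] Q == k) = true
      · have htw : (lst.drop j).takeWhile (fun y => PySem.Int.floordiv y Q == k)
            = lst[j] :: (lst.drop (j + 1)).takeWhile (fun y => PySem.Int.floordiv y Q == k) := by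
          rw [hdrop]
          simp only [List.takeWhile_cons, h2, if_pos]
        simp only [h1, dif_pos, h2, if_pos]
        rw [ih (j + 1) (by omega), htw]
        simp
        omega
      · have h2' : (PySem.Int.floordiv lst[j] Q == k) = false := by simpa using h2
        have htw : (lst.drop j).takeWhile (fun y => PySem.Int.floordiv y Q == k) = [] := by
          rw [hdrop]
          simp only [List.takeWhile_cons, h2', Bool.false_eq_true, if_false]
        simp [h1, h2', htw]
    · simp [h1, List.drop_eq_nil_of_le (by omega : lst.length ≤ j)]

theorem pvDropWhile_eq_drop (p : Int → Bool) (l : List Int) :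
    l.dropWhile p = l.drop (l.takeWhile p).length := by
  calc l.dropWhile p = (l.takeWhile p ++ l.dropWhile p).drop (l.takeWhile p).length := by
        rw [List.drop_left]
    _ = l.drop (l.takeWhile p).length := by rw [List.takeWhile_append_dropWhile]

theorem pvRunLoop_eq (lst : List Int) (Q : Int) : ∀ (m i : Nat) (gs : List (List Int)), lst.length - i ≤ m →
    pvRunLoop lst Q m i gs = gs ++ pvRuns Q (lst.drop i) := by
  intro m
  induction m with
  | zero =>
    intro i gs hi
    have hlen : lst.length ≤ i := by omega
    rw [pvRunLoop]
    simp [List.drop_eq_nil_of_le hlen, pvRuns]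
  | succ m ih =>
    intro i gs hi
    rw [pvRunLoop]
    by_cases h1 : i < lst.length
    · simp only [h1, dif_pos]
      have hdrop : lst.drop i = lst[i] :: lst.drop (i + 1) := List.drop_eq_getElem_cons h1
      have hscan : pvScanRun lst Q (PySem.Int.floordiv lst[i] Q) (lst.length - i) (i + 1)
          = (i + 1) + ((lst.drop (i + 1)).takeWhile (fun y => PySem.Int.floordiv y Q == PySem.Int.floordiv lst[i] Q)).length :=
        pvScanRun_eq lst Q _ (lst.length - i) (i + 1) (by omega)
      set t := (lst.drop (i + 1)).takeWhile (fun y => PySem.Int.floordiv y Q == PySem.Int.floordiv lst[i] Q) with ht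
      have htake : (lst.drop (i + 1)).take t.length = t :=
        (List.prefix_iff_eq_take.mp (List.takeWhile_prefix _)).symm
      have hslice : PySem.List.slice lst (some (i : Int))
          (some ((pvScanRun lst Q (PySem.Int.floordiv lst[i] Q) (lst.length - i) (i + 1) : Nat) : Int)) = lst[i] :: t := by
        rw [hscan, PySem.List.slice_natCast, hdrop]
        have hsub : i + 1 + t.length - i = t.length + 1 := by omega
        rw [hsub, List.take_succ_cons, htake]
      rw [hslice]
      rw [ih (pvScanRun lst Q (PySem.Int.floordiv lst[i] Q) (lst.length - i) (i + 1))
            (gs ++ [lst[i] :: t])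
            (by rw [hscan]; omega)]
      have hdd : lst.drop (i + 1 + t.length) = (lst.drop (i + 1)).drop t.length := by
        rw [List.drop_drop]
        try congr 1
        try omega
      rw [hscan, hdd, ht, ← pvDropWhile_eq_drop]
      conv_rhs => rw [hdrop]
      rw [pvRuns]
      simp [pvF]
    · simp [h1, List.drop_eq_nil_of_le (by omega : lst.length ≤ i), pvRuns]

-- A's loop body as a named function (definitionally A's lambda, quotients inlined)
def pvStepA (Q : Int) (lst : List Int) (st : List (List Int) × List Int) (i : Int) : List (List Int) × List Int :=
  if PySem.List.pyGetD (lst.map (fun x => PySem.Int.floordiv x Q)) i 0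
      == PySem.List.pyGetD (lst.map (fun x => PySem.Int.floordiv x Q)) (i - 1) 0
  then (st.1, st.2 ++ [PySem.List.pyGetD lst i 0])
  else (st.1 ++ [st.2], [PySem.List.pyGetD lst i 0])

theorem pvBridge (lst : List Int) (Q : Int) : ∀ (m k : Nat) (gs : List (List Int)) (cur : List Int)
    (hk : k < lst.length), lst.length - k ≤ m →
    (((PySem.List.pyRange ((k : Int) + 1) (lst.length : Int) 1).foldl (pvStepA Q lst) (gs, cur)).1
      ++ [((PySem.List.pyRange ((k : Int) + 1) (lst.length : Int) 1).foldl (pvStepA Q lst) (gs, cur)).2])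
      = pvLoopS Q gs cur lst[k] (lst.drop (k + 1)) := by
  intro m
  induction m with
  | zero => intro k gs cur hk hm; omega
  | succ m ih =>
    intro k gs cur hk hm
    by_cases h1 : k + 1 < lst.length
    · have hrange : PySem.List.pyRange ((k : Int) + 1) (lst.length : Int) 1
          = ((k : Int) + 1) :: PySem.List.pyRange ((k : Int) + 1 + 1) (lst.length : Int) 1 :=
        PySem.List.pyRange_one_cons (by exact_mod_cast h1)
      have hcast : (k : Int) + 1 = ((k + 1 : Nat) : Int) := by push_cast; ring
      have hq1 : PySem.List.pyGetD (lst.map (fun x => PySem.Int.floordiv x Q)) ((k : Int) + 1) 0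
          = PySem.Int.floordiv lst[k + 1] Q := by
        rw [hcast, PySem.List.pyGetD_natCast,
            List.getD_eq_getElem _ _ (by simpa using h1), List.getElem_map]
      have hq0 : PySem.List.pyGetD (lst.map (fun x => PySem.Int.floordiv x Q)) ((k : Int) + 1 - 1) 0
          = PySem.Int.floordiv lst[k] Q := by
        have : (k : Int) + 1 - 1 = ((k : Nat) : Int) := by ring
        rw [this, PySem.List.pyGetD_natCast,
            List.getD_eq_getElem _ _ (by simpa using hk), List.getElem_map]
      have he : PySem.List.pyGetD lst ((k : Int) + 1) 0 = lst[k + 1] := by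
        rw [hcast, PySem.List.pyGetD_natCast, List.getD_eq_getElem _ _ h1]
      have hdrop : lst.drop (k + 1) = lst[k + 1] :: lst.drop (k + 1 + 1) :=
        List.drop_eq_getElem_cons h1
      rw [hrange, List.foldl_cons]
      by_cases h2 : (pvF Q lst[k + 1] == pvF Q lst[k]) = true
      · have hstep : pvStepA Q lst (gs, cur) ((k : Int) + 1) = (gs, cur ++ [lst[k + 1]]) := by
          unfold pvStepA
          rw [hq1, hq0, he]
          simp only [pvF] at h2
          simp [h2]
        rw [hstep]
        have := ih (k + 1) gs (cur ++ [lst[k + 1]]) h1 (by omega)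
        rw [hcast, this, hdrop]
        rw [pvLoopS]
        simp [h2]
      · have h2' : (pvF Q lst[k + 1] == pvF Q lst[k]) = false := by simpa using h2
        have hstep : pvStepA Q lst (gs, cur) ((k : Int) + 1) = (gs ++ [cur], [lst[k + 1]]) := by
          unfold pvStepA
          rw [hq1, hq0, he]
          simp only [pvF] at h2'
          simp [h2']
        rw [hstep]
        have := ih (k + 1) (gs ++ [cur]) [lst[k + 1]] h1 (by omega)
        rw [hcast, this, hdrop]
        rw [pvLoopS]
        simp [h2']
    · have hrange : PySem.List.pyRange ((k : Int) + 1) (lst.length : Int) 1 = [] :=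
        PySem.List.pyRange_one_eq_nil (by exact_mod_cast (by omega : lst.length ≤ k + 1))
      have hdrop : lst.drop (k + 1) = [] := List.drop_eq_nil_of_le (by omega)
      rw [hrange, hdrop]
      simp [pvLoopS]

theorem pvA_eq_runs (lst : List Int) (Q : Int) (h : lst ≠ []) :
    GappedQuotientSplit lst Q = pvRuns Q lst := by
  obtain ⟨x, xs, rfl⟩ := List.exists_cons_of_ne_nil h
  have ha : GappedQuotientSplit (x :: xs) Q
      = (((PySem.List.pyRange 1 (((x :: xs).length : Nat) : Int) 1).foldl
            (pvStepA Q (x :: xs)) ([], [PySem.List.pyGetD (x :: xs) 0 0])).1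
        ++ [((PySem.List.pyRange 1 (((x :: xs).length : Nat) : Int) 1).foldl
            (pvStepA Q (x :: xs)) ([], [PySem.List.pyGetD (x :: xs) 0 0])).2]) := by
    unfold GappedQuotientSplit pvStepA
    rfl
  rw [PySem.List.pyGetD_zero_cons] at ha
  have hb := pvBridge (x :: xs) Q (x :: xs).length 0 [] [x] (by simp) (by omega)
  simp only [Nat.cast_zero, zero_add, List.getElem_cons_zero, List.drop_succ_cons,
    List.drop_zero] at hb
  rw [ha, hb, pvLoopS_eq]
  simp [pvRuns]

theorem pvAlt_eq_runs (lst : List Int) (Q : Int) (h : lst ≠ []) :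
    GappedQuotientSplit_alt lst Q = pvRuns Q lst := by
  unfold GappedQuotientSplit_alt
  rw [if_neg h, pvRunLoop_eq lst Q lst.length 0 [] (by omega)]
  simp

-- ===== VERDICT (by name: the statement is the Claim_ definition above) =====
theorem GappedQuotientSplit_spec : Claim_equal_GappedQuotientSplit := by
  intro lst Q hdom hpre
  unfold Spec_GappedQuotientSplit
  rw [pvA_eq_runs lst Q hpre.1, pvAlt_eq_runs lst Q hpre.1]
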